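-- pv_equiv track=rewrite | github.com/Parmida-Hooshang/Crypto-Processor | test-utils/assets.py | sign_extended_bin
-- ===== SOURCE A (Python) =====
-- def sign_extended_bin(n, length = 32):
--     if n >= 0:
--         res = bin(n)[2:]
--         res = (length - len(res)) * '0' + res
--
--     else:
--         n = -n
--         res = bin(n)[2:]
--         res = (length - len(res)) * '0' + res
--         s = ''
--         for j in res:
--             if j == '0':
--                 s += '1'
--             else:
--                 s += '0'
--
--         res = ""
--         b = False
--         for j in range(len(s) - 1, -1, -1):
--             if not b:
--                 if s[j] == '1':
--                     res = '0' + res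
--                 else:
--                     res = '1' + res
--                     b = True
--             else:
--                 res = s[j] + res
--
--     return res
-- ===== SOURCE B (Python) =====
-- def sign_extended_bin(n, length = 32):
--     if n >= 0:
--         return bin(n)[2:].zfill(max(length, 0))
--     w = max(length, (-n).bit_length())
--     return bin((1 << w) + n)[2:].zfill(w)
-- ===== Notes on version B (the rewrite author's own statement) =====
-- stated objective: simpler
-- what changed: The negative branch's two loops (manual bit-flip then ripple increment) are replaced by the closed-form two's complement (1 << w) + n with w = max(length, bit_length), formatted with bin/zfill.
import Mathlib
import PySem

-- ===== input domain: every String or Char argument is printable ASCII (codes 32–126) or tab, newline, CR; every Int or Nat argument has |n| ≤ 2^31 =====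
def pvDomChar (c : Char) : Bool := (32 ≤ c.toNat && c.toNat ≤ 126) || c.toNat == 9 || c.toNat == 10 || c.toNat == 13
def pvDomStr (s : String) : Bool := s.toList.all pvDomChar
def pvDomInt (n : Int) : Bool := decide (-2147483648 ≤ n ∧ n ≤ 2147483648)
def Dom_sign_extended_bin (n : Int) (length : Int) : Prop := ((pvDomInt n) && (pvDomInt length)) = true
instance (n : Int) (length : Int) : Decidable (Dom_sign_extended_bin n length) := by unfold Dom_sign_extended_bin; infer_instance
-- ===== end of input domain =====

-- B replaces A's negative-branch flip-then-increment loops by the closed-form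
-- two's complement 2^w - (-n) rendered in binary (objective: simpler).

-- ===== PORT A =====
-- bin(m)[2:] for m ≥ 1 (MSB first)
def natBinPos (m : Nat) : List Char :=
  if _h : m ≤ 1 then ['1']
  else natBinPos (m / 2) ++ [if m % 2 = 1 then '1' else '0']
decreasing_by exact Nat.div_lt_self (by omega) (by omega)

-- bin(m)[2:] for m ≥ 0
def natBin (m : Nat) : List Char := if m = 0 then ['0'] else natBinPos m

-- A's second loop: scan s from the last index down to 0 (here: over s.reverse),
-- prepending to res with carry flag b, exactly as the Python does.
def incAux : List Char → List Char → Bool → List Char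
  | [], res, _ => res
  | j :: rest, res, b =>
    if !b then
      if j = '1' then incAux rest ('0' :: res) false
      else incAux rest ('1' :: res) true
    else incAux rest (j :: res) true

def sign_extended_bin (n : Int) (length : Int) : String :=
  if n ≥ 0 then
    let res := natBin n.toNat
    String.mk (List.replicate (length - (res.length : Int)).toNat '0' ++ res)
  else
    let m := (-n).toNat
    let res0 := natBin m
    let res1 := List.replicate (length - (res0.length : Int)).toNat '0' ++ res0
    let s := res1.foldl (fun acc j => acc ++ [if j = '0' then '1' else '0']) []
    String.mk (incAux s.reverse [] false)

-- ===== PORT B =====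
-- (-n).bit_length()
def bitLen (m : Nat) : Nat :=
  if h : m = 0 then 0 else bitLen (m / 2) + 1
decreasing_by exact Nat.div_lt_self (by omega) (by omega)

-- s.zfill(w) (no-op for w ≤ len(s))
def zfill (s : List Char) (w : Nat) : List Char := List.replicate (w - s.length) '0' ++ s

def sign_extended_bin_alt (n : Int) (length : Int) : String :=
  if n ≥ 0 then
    String.mk (zfill (natBin n.toNat) length.toNat)
  else
    let m := (-n).toNat
    let w := (max length (bitLen m : Int)).toNat
    String.mk (zfill (natBin (2 ^ w - m)) w)

-- ===== PRECONDITION & SPEC =====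
def Spec_sign_extended_bin (n : Int) (length : Int) (out : String) : Prop := out = sign_extended_bin_alt n length
instance (n : Int) (length : Int) (out : String) : Decidable (Spec_sign_extended_bin n length out) := by unfold Spec_sign_extended_bin; infer_instance

-- ===== CLAIM (what is proved, stated in full; the proofs are below) =====
def Claim_equal_sign_extended_bin : Prop := ∀ (n : Int) (length : Int), Dom_sign_extended_bin n length → Spec_sign_extended_bin n length (sign_extended_bin n length)

-- ===== LEMMAS AND PROOFS =====

-- w-bit little-endian (LSB-first) binary digits of m
def bitsLE : Nat → Nat → List Char
  | _, 0 => []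
  | m, w + 1 => (if m % 2 = 1 then '1' else '0') :: bitsLE (m / 2) w

theorem bitsLE_zero (w : Nat) : bitsLE 0 w = List.replicate w '0' := by
  induction w with
  | zero => rfl
  | succ w ih => simp [bitsLE, ih, List.replicate_succ]

theorem foldl_snoc_map (f : Char → Char) (l acc : List Char) :
    l.foldl (fun a j => a ++ [f j]) acc = acc ++ l.map f := by
  induction l generalizing acc with
  | nil => simp
  | cons x xs ih => simp [List.foldl, ih]

theorem natBinPos_length (m : Nat) (hm : 1 ≤ m) : (natBinPos m).length = bitLen m := by
  induction m using Nat.strong_induction_on with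
  | _ m ih =>
    rw [natBinPos, bitLen]
    split
    · rename_i h
      have : m = 1 := by omega
      subst this
      simp [bitLen]
    · rename_i h
      simp only [dif_neg (by omega : ¬ m = 0), List.length_append, List.length_cons,
        List.length_nil]
      rw [ih (m / 2) (Nat.div_lt_self (by omega) (by omega)) (by omega)]

theorem lt_two_pow_bitLen (m : Nat) : m < 2 ^ bitLen m := by
  induction m using Nat.strong_induction_on with
  | _ m ih =>
    rw [bitLen]
    split
    · omega
    · rename_i h
      have h2 := ih (m / 2) (Nat.div_lt_self (by omega) (by omega))
      rw [pow_succ]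
      omega

theorem pad_natBinPos (w : Nat) : ∀ m, 1 ≤ m → m < 2 ^ w →
    List.replicate (w - (natBinPos m).length) '0' ++ natBinPos m = (bitsLE m w).reverse := by
  induction w with
  | zero => intro m h1 h2; omega
  | succ w ih =>
    intro m h1 h2
    rw [natBinPos, bitsLE]
    by_cases hm : m ≤ 1
    · have : m = 1 := by omega
      subst this
      simp [bitsLE_zero]
    · rw [dif_neg hm]
      have hd1 : 1 ≤ m / 2 := by omega
      have hd2 : m / 2 < 2 ^ w := by rw [pow_succ] at h2; omega
      have := ih (m / 2) hd1 hd2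
      simp only [List.length_append, List.length_cons, List.length_nil, List.reverse_cons]
      rw [show w + 1 - ((natBinPos (m / 2)).length + 0 + 1) = w - (natBinPos (m / 2)).length by omega,
        ← List.append_assoc, this]

theorem map_flip_bits (w : Nat) : ∀ m, m < 2 ^ w →
    (bitsLE m w).map (fun j => if j = '0' then '1' else '0') = bitsLE (2 ^ w - 1 - m) w := by
  induction w with
  | zero => intro m _; rfl
  | succ w ih =>
    intro m hm
    have hp : 2 ^ (w + 1) = 2 * 2 ^ w := by rw [pow_succ]; ring
    have hpw : 1 ≤ 2 ^ w := Nat.one_le_two_pow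
    rw [bitsLE, bitsLE, List.map_cons]
    have hdiv : (2 ^ (w + 1) - 1 - m) / 2 = 2 ^ w - 1 - m / 2 := by omega
    have hmod : (2 ^ (w + 1) - 1 - m) % 2 = 1 - m % 2 := by omega
    rw [hdiv, ih (m / 2) (by omega), hmod]
    congr 1
    rcases Nat.mod_two_eq_zero_or_one m with h | h <;> simp [h]

theorem incAux_copy (t : List Char) : ∀ res, incAux t res true = t.reverse ++ res := by
  induction t with
  | nil => intro res; simp [incAux]
  | cons x xs ih => intro res; simp [incAux, ih]

theorem incAux_cons0 (t res : List Char) : incAux ('0' :: t) res false = incAux t ('1' :: res) true := by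
  simp [incAux]

theorem incAux_cons1 (t res : List Char) : incAux ('1' :: t) res false = incAux t ('0' :: res) false := by
  simp [incAux]

theorem incAux_bits (w : Nat) : ∀ c res, c + 1 < 2 ^ w →
    incAux (bitsLE c w) res false = (bitsLE (c + 1) w).reverse ++ res := by
  induction w with
  | zero => intro c res h; omega
  | succ w ih =>
    intro c res h
    have hp : 2 ^ (w + 1) = 2 * 2 ^ w := by rw [pow_succ]; ring
    rcases Nat.mod_two_eq_zero_or_one c with hc | hc
    · -- c even: lowest bit '0' → write '1', then copy
      have h0 : bitsLE c (w + 1) = '0' :: bitsLE (c / 2) w := by rw [bitsLE]; simp [hc]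
      have h1 : bitsLE (c + 1) (w + 1) = '1' :: bitsLE (c / 2) w := by
        rw [bitsLE, show (c + 1) % 2 = 1 by omega, show (c + 1) / 2 = c / 2 by omega]; simp
      rw [h0, h1, incAux_cons0, incAux_copy]
      simp
    · -- c odd: lowest bit '1' → write '0', carry on
      have h0 : bitsLE c (w + 1) = '1' :: bitsLE (c / 2) w := by rw [bitsLE]; simp [hc]
      have h1 : bitsLE (c + 1) (w + 1) = '0' :: bitsLE (c / 2 + 1) w := by
        rw [bitsLE, show (c + 1) % 2 = 0 by omega, show (c + 1) / 2 = c / 2 + 1 by omega]; simp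
      rw [h0, h1, incAux_cons1, ih (c / 2) _ (by omega)]
      simp

-- ===== VERDICT (by name: the statement is the Claim_ definition above) =====
theorem sign_extended_bin_spec : Claim_equal_sign_extended_bin := by
  intro n length _
  unfold Spec_sign_extended_bin sign_extended_bin sign_extended_bin_alt
  by_cases hn : n ≥ 0
  · rw [if_pos hn, if_pos hn]
    dsimp only
    unfold zfill
    have h : (length - ((natBin n.toNat).length : Int)).toNat
        = length.toNat - (natBin n.toNat).length := by omega
    rw [h]
  · rw [if_neg hn, if_neg hn]
    dsimp only
    unfold zfill
    have hm1 : 1 ≤ (-n).toNat := by omega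
    generalize hM : (-n).toNat = m at *
    have hbin : natBin m = natBinPos m := by unfold natBin; rw [if_neg (by omega)]
    have hlen : (natBinPos m).length = bitLen m := natBinPos_length m hm1
    have hmk : m < 2 ^ bitLen m := lt_two_pow_bitLen m
    have hpad : (length - ((natBin m).length : Int)).toNat
        = (max length ((bitLen m : Nat) : Int)).toNat - (natBinPos m).length := by
      rw [hbin, hlen]; omega
    rw [hbin] at hpad
    rw [hbin, hpad]
    have hwk : bitLen m ≤ (max length ((bitLen m : Nat) : Int)).toNat := by omega
    generalize hW : (max length ((bitLen m : Nat) : Int)).toNat = w at *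
    have hmw : m < 2 ^ w := lt_of_lt_of_le hmk (Nat.pow_le_pow_right (by omega) hwk)
    rw [pad_natBinPos w m hm1 hmw, foldl_snoc_map]
    simp only [List.nil_append, ← List.map_reverse, List.reverse_reverse]
    rw [map_flip_bits w m hmw]
    have hpw : 1 ≤ 2 ^ w := Nat.one_le_two_pow
    rw [incAux_bits w (2 ^ w - 1 - m) [] (by omega)]
    rw [show 2 ^ w - 1 - m + 1 = 2 ^ w - m by omega]
    rw [show natBin (2 ^ w - m) = natBinPos (2 ^ w - m) by
      unfold natBin; rw [if_neg (by omega)]]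
    rw [pad_natBinPos w _ (by omega) (by omega)]
    simp
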